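-- pv_equiv track=rewrite | github.com/nyomanyoga/Game_2048 | Genetic_Algorithm.py | jawabDataUji
-- ===== SOURCE A (Python) =====
-- def jawabDataUji(listT, data_uji):
-- 	terbang=[]
-- 	for x in range(len(data_uji)):
-- 		c=0;kebenaran=False
-- 		while(c<len(listT)/15 and (not kebenaran) and listT[(c*15)+14]==1):
-- 			cek=0
-- 			for y in range(15):
-- 				if(listT[(c*15)+y]==1):
-- 					cek+=1
-- 			if(cek!=15):
-- 				status='false';status1='false';status2='false';status3='false'
-- 				for i in range(3):
-- 					if(data_uji[x][i]==listT[(c*15)+i]):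
-- 						status='true'
-- 				for i in range(3,7):
-- 					if(data_uji[x][i]==listT[(c*15)+i]):
-- 						status1='true'
-- 				for i in range(7,11):
-- 					if(data_uji[x][i]==listT[(c*15)+i]):
-- 						status2='true'
-- 				for i in range(11,14):
-- 					if(data_uji[x][i]==listT[(c*15)+i]):
-- 						status3='true'
-- 				if(status==status1==status2==status3=='true'):
-- 					kebenaran=True
-- 			c+=1
-- 		if(kebenaran):
-- 			terbang.append(1)
-- 		else:
-- 			terbang.append(0)
-- 	return terbang
-- ===== SOURCE B (Python) =====
-- def _matches(point, block):
-- 	eq = [p == b for p, b in zip(point, block)]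
-- 	return any(eq[0:3]) and any(eq[3:7]) and any(eq[7:11]) and any(eq[11:14])
--
-- def jawabDataUji(listT, data_uji):
-- 	if not data_uji:
-- 		return []
-- 	hits = [False] * len(data_uji)
-- 	r = 0
-- 	while 15 * r < len(listT) and listT[15 * r + 14] == 1:
-- 		block = listT[15 * r:15 * r + 15]
-- 		r += 1
-- 		if block == [1] * 15:
-- 			continue
-- 		hits = [h or _matches(p, block) for h, p in zip(hits, data_uji)]
-- 	return [1 if h else 0 for h in hits]
-- ===== Notes on version B (the rewrite author's own statement) =====
-- stated objective: alternative
-- what changed: B transposes the loop nesting: instead of A's per-point while loop that rescans rule blocks with index arithmetic, B sweeps the rules once in the outer loop, maintaining a boolean hit vector over all points that it ORs with each non-all-ones rule's matches, and matches a point by building the elementwise equality vector (zip) once and testing its four segment slices with any().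
-- outside the precondition, e.g. on jawabDataUji([1, 1, 1, 1, 1, 1, 1, 1, 1, 1, 1, 1, 1, 1, 1], [[]]): A returns [0], B returns [0]
import Mathlib
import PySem

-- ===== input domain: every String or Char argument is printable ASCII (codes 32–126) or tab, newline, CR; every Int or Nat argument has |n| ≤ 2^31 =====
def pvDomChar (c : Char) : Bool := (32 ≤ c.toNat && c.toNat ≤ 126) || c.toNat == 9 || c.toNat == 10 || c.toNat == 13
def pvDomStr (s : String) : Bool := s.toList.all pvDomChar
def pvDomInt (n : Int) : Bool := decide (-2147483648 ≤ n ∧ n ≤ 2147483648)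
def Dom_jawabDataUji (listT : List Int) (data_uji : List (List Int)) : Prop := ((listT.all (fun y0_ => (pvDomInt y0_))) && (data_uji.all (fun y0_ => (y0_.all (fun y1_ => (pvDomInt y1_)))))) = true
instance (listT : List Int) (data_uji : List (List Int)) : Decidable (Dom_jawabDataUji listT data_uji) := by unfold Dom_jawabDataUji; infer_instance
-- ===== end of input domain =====

-- B transposes the loop nesting (rule-major sweep updating a hit vector; matching via the
-- elementwise equality vector and its four segment slices); same return value on Pre_.

-- ===== PORT A =====
-- cek counter: 'for y in range(15): if listT[(c*15)+y]==1: cek+=1'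
def pvCekA (listT : List Int) (c : Nat) : Int :=
  (PySem.List.pyRange 0 15).foldl
    (fun cek y => if PySem.List.pyGetD listT ((c : Int) * 15 + y) 0 == 1 then cek + 1 else cek) 0

-- one of the four status loops: 'for i in range(lo,hi): if data_uji[x][i]==listT[(c*15)+i]: status='true''
-- (the four Python loops are identical up to the range bounds, passed here as lo/hi)
def pvStatusA (listT point : List Int) (c : Nat) (lo hi : Int) : Bool :=
  (PySem.List.pyRange lo hi).foldl
    (fun s i => if PySem.List.pyGetD point i 0 == PySem.List.pyGetD listT ((c : Int) * 15 + i) 0 then true else s) false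

-- the while loop; fuel ≥ number of remaining iterations (the loop runs at most len(listT) times).
-- Python's float test 'c < len(listT)/15' holds exactly when 15*c < len(listT) (both sides exact integers).
def pvWhileA (listT point : List Int) : Nat → Nat → Bool
  | 0, _ => false
  | fuel+1, c =>
    if decide (15 * c < listT.length) && (PySem.List.pyGetD listT ((c : Int) * 15 + 14) 0 == 1) then
      if pvCekA listT c != 15 then
        if pvStatusA listT point c 0 3 && (pvStatusA listT point c 3 7 &&
           (pvStatusA listT point c 7 11 && pvStatusA listT point c 11 14)) then true
        else pvWhileA listT point fuel (c+1)
      else pvWhileA listT point fuel (c+1)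
    else false

def jawabDataUji (listT : List Int) (data_uji : List (List Int)) : List Int :=
  (PySem.List.pyRange 0 (data_uji.length)).foldl
    (fun terbang x =>
      terbang ++ [if pvWhileA listT (PySem.List.pyGetD data_uji x []) (listT.length + 1) 0 then (1 : Int) else 0])
    []

-- ===== PORT B =====
-- 'eq = [p == b for p, b in zip(point, block)]'
def pvEqList (point block : List Int) : List Bool :=
  (point.zip block).map (fun pb => pb.1 == pb.2)

-- '_matches': any over the four segment slices of the equality vector
def pvMatches (point block : List Int) : Bool :=
  (PySem.List.slice (pvEqList point block) (some 0) (some 3)).any id &&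
  ((PySem.List.slice (pvEqList point block) (some 3) (some 7)).any id &&
   ((PySem.List.slice (pvEqList point block) (some 7) (some 11)).any id &&
    (PySem.List.slice (pvEqList point block) (some 11) (some 14)).any id))

-- the rule-major while loop carrying the hit vector; fuel ≥ remaining iterations
def pvRuleLoop (listT : List Int) (data_uji : List (List Int)) : Nat → Nat → List Bool → List Bool
  | 0, _, hits => hits
  | fuel+1, r, hits =>
    if decide (15 * r < listT.length) && (PySem.List.pyGetD listT (15 * (r : Int) + 14) 0 == 1) then
      if PySem.List.slice listT (some ((15 * r : Nat) : Int)) (some ((15 * r + 15 : Nat) : Int))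
           == List.replicate 15 (1 : Int) then
        pvRuleLoop listT data_uji fuel (r+1) hits
      else
        pvRuleLoop listT data_uji fuel (r+1)
          ((hits.zip data_uji).map (fun hp => hp.1 ||
            pvMatches hp.2 (PySem.List.slice listT (some ((15 * r : Nat) : Int)) (some ((15 * r + 15 : Nat) : Int)))))
    else hits

def jawabDataUji_alt (listT : List Int) (data_uji : List (List Int)) : List Int :=
  if data_uji.isEmpty then []
  else
    (pvRuleLoop listT data_uji (listT.length + 1) 0 (List.replicate data_uji.length false)).map
      (fun h => if h then (1 : Int) else 0)

-- ===== PRECONDITION & SPEC =====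
-- Pre_ excludes the inputs on which A's lazy scan raises IndexError (listT length not a multiple
-- of 15 reached by the block scan, or a data point shorter than 14 reached by a non-all-ones
-- active rule); it is slightly narrower than that reason: on some excluded inputs the scan stops
-- before the out-of-range access and A still returns (see the cites in claim.json).
def Pre_jawabDataUji (listT : List Int) (data_uji : List (List Int)) : Prop :=
  data_uji = [] ∨ listT = [] ∨ (15 ≤ listT.length ∧ listT[14]? ≠ some 1) ∨
    (listT.length % 15 = 0 ∧ ∀ p ∈ data_uji, 14 ≤ p.length)
instance (listT : List Int) (data_uji : List (List Int)) : Decidable (Pre_jawabDataUji listT data_uji) := by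
  unfold Pre_jawabDataUji; infer_instance

def pvWitness_jawabDataUji : List Int × List (List Int) :=
  ([0,0,0,0,0,0,0,0,0,0,0,0,0,0,1], [[0,0,0,0,0,0,0,0,0,0,0,0,0,0]])

def Spec_jawabDataUji (listT : List Int) (data_uji : List (List Int)) (out : List Int) : Prop := out = jawabDataUji_alt listT data_uji
instance (listT : List Int) (data_uji : List (List Int)) (out : List Int) : Decidable (Spec_jawabDataUji listT data_uji out) := by unfold Spec_jawabDataUji; infer_instance

-- ===== CLAIM (what is proved, stated in full; the proofs are below) =====
def Claim_equal_jawabDataUji : Prop := ∀ (listT : List Int) (data_uji : List (List Int)), Dom_jawabDataUji listT data_uji → Pre_jawabDataUji listT data_uji → Spec_jawabDataUji listT data_uji (jawabDataUji listT data_uji)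

-- ===== LEMMAS AND PROOFS =====

-- proof-side helper: 'every entry of the block is 1'
def pvAllOnes (block : List Int) : Bool := block.all (fun v => v == 1)

-- proof-side helper: the rule-existence predicate the hit vector accumulates, per point
def pvAnyRule (listT point : List Int) : Nat → Nat → Bool
  | 0, _ => false
  | fuel+1, r =>
    if decide (15 * r < listT.length) && (PySem.List.pyGetD listT (15 * (r : Int) + 14) 0 == 1) then
      if PySem.List.slice listT (some ((15 * r : Nat) : Int)) (some ((15 * r + 15 : Nat) : Int))
           == List.replicate 15 (1 : Int) then
        pvAnyRule listT point fuel (r+1)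
      else
        pvMatches point (PySem.List.slice listT (some ((15 * r : Nat) : Int)) (some ((15 * r + 15 : Nat) : Int)))
          || pvAnyRule listT point fuel (r+1)
    else false

-- an or-accumulating status loop is an 'any'
theorem pvFoldlIfTrue {α : Type} (p : α → Bool) (l : List α) (b : Bool) :
    l.foldl (fun s i => if p i then true else s) b = (b || l.any p) := by
  induction l generalizing b with
  | nil => simp
  | cons x l ih =>
    simp only [List.foldl_cons, List.any_cons]
    rw [ih]
    cases h : p x <;> simp

theorem pvBlockGetD (listT : List Int) (c : Nat) (i : Int)
    (_h15 : c * 15 + 15 ≤ listT.length) (h0 : 0 ≤ i) (hi : i < 15) :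
    PySem.List.pyGetD (PySem.List.slice listT (some ((15 * c : Nat) : Int)) (some ((15 * c + 15 : Nat) : Int))) i 0
      = PySem.List.pyGetD listT ((c : Int) * 15 + i) 0 := by
  rw [PySem.List.slice_natCast]
  have hidx : (c : Int) * 15 + i = ((c * 15 + i.toNat : Nat) : Int) := by omega
  rw [hidx, PySem.List.pyGetD_natCast]
  conv_lhs => rw [show i = ((i.toNat : Nat) : Int) by omega, PySem.List.pyGetD_natCast]
  have h1 : (15 * c + 15) - 15 * c = 15 := by omega
  simp only [List.getD, List.getElem?_take, List.getElem?_drop, h1]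
  rw [if_pos (by omega)]
  have h2 : 15 * c + i.toNat = c * 15 + i.toNat := by omega
  rw [h2]

theorem pvCek_eq_iff (listT : List Int) (c : Nat) (h15 : c * 15 + 15 ≤ listT.length) :
    (pvCekA listT c = 15) ↔
      (pvAllOnes (PySem.List.slice listT (some ((15 * c : Nat) : Int)) (some ((15 * c + 15 : Nat) : Int))) = true) := by
  have hlen : (PySem.List.slice listT (some ((15 * c : Nat) : Int)) (some ((15 * c + 15 : Nat) : Int))).length = 15 := by
    rw [PySem.List.slice_natCast]
    simp only [List.length_take, List.length_drop]
    omega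
  unfold pvCekA pvAllOnes
  rw [PySem.List.foldl_count_if (fun y => PySem.List.pyGetD listT ((c : Int) * 15 + y) 0 == 1)]
  rw [List.all_eq_true]
  constructor
  · intro hsum v hv
    have hcnt : List.countP (fun y => PySem.List.pyGetD listT ((c : Int) * 15 + y) 0 == 1)
        (PySem.List.pyRange 0 15) = (PySem.List.pyRange 0 15).length := by
      rw [PySem.List.length_pyRange_one]; omega
    rw [List.countP_eq_length] at hcnt
    obtain ⟨j, hj, rfl⟩ := List.mem_iff_getElem.mp hv
    have hj15 : j < 15 := by omega
    have hp := hcnt ((j : Nat) : Int) (by rw [PySem.List.mem_pyRange_one]; omega)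
    rw [← pvBlockGetD listT c ((j : Nat) : Int) h15 (by omega) (by exact_mod_cast hj15)] at hp
    rw [PySem.List.pyGetD_natCast, List.getD_eq_getElem _ _ hj] at hp
    exact hp
  · intro hall
    have hmem : ∀ y ∈ PySem.List.pyRange 0 15,
        (fun y => PySem.List.pyGetD listT ((c : Int) * 15 + y) 0 == 1) y = true := by
      intro y hy
      rw [PySem.List.mem_pyRange_one] at hy
      simp only
      rw [← pvBlockGetD listT c y h15 (by omega) (by omega)]
      conv_lhs => rw [show y = ((y.toNat : Nat) : Int) by omega, PySem.List.pyGetD_natCast]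
      rw [List.getD_eq_getElem _ _ (by omega)]
      exact hall _ (List.getElem_mem _)
    rw [← List.countP_eq_length] at hmem
    rw [hmem, PySem.List.length_pyRange_one]
    norm_num

-- all-ones as equality with the replicate literal (the form B tests)
theorem pvAllOnes_iff_replicate (block : List Int) (hlen : block.length = 15) :
    (block == List.replicate 15 (1 : Int)) = pvAllOnes block := by
  unfold pvAllOnes
  rw [Bool.eq_iff_iff, beq_iff_eq, List.eq_replicate_iff, List.all_eq_true]
  simp [hlen]

theorem pvStatus_eq (listT point : List Int) (c : Nat) (lo hi : Int) (h0 : 0 ≤ lo) (hhi : hi ≤ 14)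
    (h15 : c * 15 + 15 ≤ listT.length) :
    (PySem.List.pyRange lo hi).any (fun i => PySem.List.pyGetD point i 0 ==
        PySem.List.pyGetD (PySem.List.slice listT (some ((15 * c : Nat) : Int)) (some ((15 * c + 15 : Nat) : Int))) i 0)
      = pvStatusA listT point c lo hi := by
  unfold pvStatusA
  rw [pvFoldlIfTrue, Bool.false_or]
  apply PySem.List.any_congr_mem
  intro i hi
  rw [PySem.List.mem_pyRange_one] at hi
  rw [pvBlockGetD listT c i h15 (by omega) (by omega)]

-- a segment slice of the equality vector is an 'any' over the index range
theorem pvSeg_any (point block : List Int) (lo hi : Int) (h0 : 0 ≤ lo) (hlh : lo ≤ hi)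
    (hhp : hi ≤ point.length) (hhb : hi ≤ block.length) :
    (PySem.List.slice (pvEqList point block) (some lo) (some hi)).any id
      = (PySem.List.pyRange lo hi).any
          (fun i => PySem.List.pyGetD point i 0 == PySem.List.pyGetD block i 0) := by
  have hlen : (pvEqList point block).length = min point.length block.length := by
    unfold pvEqList; simp
  rw [PySem.List.slice_toNat]
  rw [Bool.eq_iff_iff]
  simp only [List.any_eq_true, id]
  constructor
  · rintro ⟨b, hb, hbt⟩
    obtain ⟨j, hj, rfl⟩ := List.mem_iff_getElem.mp hb
    have hj' : j < hi.toNat - lo.toNat ∧ lo.toNat + j < (pvEqList point block).length := by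
      simp only [List.length_take, List.length_drop] at hj; omega
    simp only [List.getElem_take, List.getElem_drop] at hbt
    refine ⟨((lo.toNat + j : Nat) : Int), by rw [PySem.List.mem_pyRange_one]; omega, ?_⟩
    have hk : lo.toNat + j < min point.length block.length := by omega
    unfold pvEqList at hbt
    simp only [List.getElem_map, List.getElem_zip] at hbt
    rw [PySem.List.pyGetD_natCast, PySem.List.pyGetD_natCast,
        List.getD_eq_getElem _ _ (by omega), List.getD_eq_getElem _ _ (by omega)]
    exact hbt
  · rintro ⟨i, him, hpt⟩
    rw [PySem.List.mem_pyRange_one] at him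
    have hk : i.toNat < min point.length block.length := by omega
    have hjlen : i.toNat - lo.toNat <
        (List.take (hi.toNat - lo.toNat) (List.drop lo.toNat (pvEqList point block))).length := by
      simp only [List.length_take, List.length_drop]; omega
    refine ⟨_, List.mem_iff_getElem.mpr ⟨i.toNat - lo.toNat, hjlen, rfl⟩, ?_⟩
    simp only [List.getElem_take, List.getElem_drop]
    have hl : lo.toNat + (i.toNat - lo.toNat) = i.toNat := by omega
    unfold pvEqList
    simp only [List.getElem_map, List.getElem_zip, hl]
    rw [PySem.List.pyGetD_eq_getElem point 0 (by omega) (by omega),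
        PySem.List.pyGetD_eq_getElem block 0 (by omega) (by omega)] at hpt
    exact hpt
  · exact h0
  · omega

-- B's matcher equals A's four status loops (block = the c-th slice of listT)
theorem pvMatches_eq (listT point : List Int) (c : Nat)
    (h15 : c * 15 + 15 ≤ listT.length) (hp : 14 ≤ point.length) :
    pvMatches point (PySem.List.slice listT (some ((15 * c : Nat) : Int)) (some ((15 * c + 15 : Nat) : Int)))
      = (pvStatusA listT point c 0 3 && (pvStatusA listT point c 3 7 &&
         (pvStatusA listT point c 7 11 && pvStatusA listT point c 11 14))) := by
  have hbl : (PySem.List.slice listT (some ((15 * c : Nat) : Int)) (some ((15 * c + 15 : Nat) : Int))).length = 15 := by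
    rw [PySem.List.slice_natCast]
    simp only [List.length_take, List.length_drop]
    omega
  unfold pvMatches
  rw [pvSeg_any _ _ 0 3 (by omega) (by omega) (by omega) (by omega),
      pvSeg_any _ _ 3 7 (by omega) (by omega) (by omega) (by omega),
      pvSeg_any _ _ 7 11 (by omega) (by omega) (by omega) (by omega),
      pvSeg_any _ _ 11 14 (by omega) (by omega) (by omega) (by omega)]
  rw [pvStatus_eq listT point c 0 3 (by omega) (by omega) h15,
      pvStatus_eq listT point c 3 7 (by omega) (by omega) h15,
      pvStatus_eq listT point c 7 11 (by omega) (by omega) h15,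
      pvStatus_eq listT point c 11 14 (by omega) (by omega) h15]

-- map of first components of the zipped hit vector (equal lengths)
theorem pvMapFst (hits : List Bool) (data : List (List Int)) (h : hits.length = data.length) :
    (hits.zip data).map (fun hp => hp.1) = hits := by
  induction hits generalizing data with
  | nil => simp
  | cons a t ih =>
    cases data with
    | nil => simp at h
    | cons p ps => simpa using ih ps (by simpa using h)

-- updating then re-sweeping the zipped hit vector composes pointwise
theorem pvZipStep (listT B : List Int) (fuel r : Nat) :
    ∀ (hits : List Bool) (data : List (List Int)),
      (((hits.zip data).map (fun hp => hp.1 || pvMatches hp.2 B)).zip data).map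
          (fun hp => hp.1 || pvAnyRule listT hp.2 fuel r)
        = (hits.zip data).map (fun hp => hp.1 || (pvMatches hp.2 B || pvAnyRule listT hp.2 fuel r)) := by
  intro hits
  induction hits with
  | nil => intro data; simp
  | cons h t ih =>
    intro data
    cases data with
    | nil => simp
    | cons p ps => simp [ih, Bool.or_assoc]

-- the rule-major sweep computes, per point, the OR of the initial flag with pvAnyRule
theorem pvRuleLoop_eq (listT : List Int) (data : List (List Int)) :
    ∀ (fuel r : Nat) (hits : List Bool), hits.length = data.length →
      pvRuleLoop listT data fuel r hits
        = (hits.zip data).map (fun hp => hp.1 || pvAnyRule listT hp.2 fuel r) := by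
  intro fuel
  induction fuel with
  | zero =>
    intro r hits hlen
    simp only [pvRuleLoop, pvAnyRule, Bool.or_false]
    exact (pvMapFst hits data hlen).symm
  | succ fuel ih =>
    intro r hits hlen
    rw [pvRuleLoop]
    by_cases hcond : (decide (15 * r < listT.length)
        && (PySem.List.pyGetD listT (15 * (r : Int) + 14) 0 == 1)) = true
    · rw [if_pos hcond]
      by_cases hall : (PySem.List.slice listT (some ((15 * r : Nat) : Int)) (some ((15 * r + 15 : Nat) : Int))
          == List.replicate 15 (1 : Int)) = true
      · rw [if_pos hall, ih (r+1) hits hlen]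
        apply List.map_congr_left
        intro hp _
        show (hp.1 || pvAnyRule listT hp.2 fuel (r+1)) = (hp.1 || pvAnyRule listT hp.2 (fuel+1) r)
        conv_rhs => rw [pvAnyRule]
        rw [if_pos hcond, if_pos hall]
      · rw [if_neg hall]
        rw [ih (r+1) _ (by simp [hlen])]
        rw [pvZipStep listT _ fuel (r+1) hits data]
        apply List.map_congr_left
        intro hp _
        show (hp.1 || (pvMatches hp.2 _ || pvAnyRule listT hp.2 fuel (r+1)))
            = (hp.1 || pvAnyRule listT hp.2 (fuel+1) r)
        conv_rhs => rw [pvAnyRule]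
        rw [if_pos hcond, if_neg hall]
    · rw [if_neg hcond]
      have hstep : ∀ hp ∈ hits.zip data,
          (hp.1 || pvAnyRule listT hp.2 (fuel+1) r) = hp.1 := by
        intro hp _
        rw [pvAnyRule, if_neg hcond, Bool.or_false]
      rw [List.map_congr_left hstep]
      exact (pvMapFst hits data hlen).symm

-- starting from the all-false vector the sweep is just a map of pvAnyRule
theorem pvReplZip (listT : List Int) (fuel : Nat) (data : List (List Int)) :
    ((List.replicate data.length false).zip data).map (fun hp => hp.1 || pvAnyRule listT hp.2 fuel 0)
      = data.map (fun p => pvAnyRule listT p fuel 0) := by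
  induction data with
  | nil => simp
  | cons p ps ih => simpa [List.replicate_succ] using ih

theorem pvAlt_map (listT : List Int) (data : List (List Int)) (hd : data ≠ []) :
    jawabDataUji_alt listT data
      = data.map (fun p => if pvAnyRule listT p (listT.length + 1) 0 then (1 : Int) else 0) := by
  unfold jawabDataUji_alt
  rw [if_neg (by simpa [List.isEmpty_iff] using hd)]
  rw [pvRuleLoop_eq listT data (listT.length + 1) 0 _ (by simp)]
  rw [pvReplZip listT (listT.length + 1) data]
  rw [List.map_map]
  rfl

-- per point, A's while loop equals B's accumulated rule predicate
theorem pvLoop_eq (listT point : List Int) (hmod : listT.length % 15 = 0) (hp : 14 ≤ point.length) :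
    ∀ (fuel c : Nat), pvWhileA listT point fuel c = pvAnyRule listT point fuel c := by
  intro fuel
  induction fuel with
  | zero => intro c; simp [pvWhileA, pvAnyRule]
  | succ fuel ih =>
    intro c
    rw [pvWhileA, pvAnyRule]
    have hmul : (c : Int) * 15 + 14 = 15 * (c : Int) + 14 := by ring
    rw [hmul]
    by_cases hcond : (decide (15 * c < listT.length) && (PySem.List.pyGetD listT (15 * (c : Int) + 14) 0 == 1)) = true
    · rw [if_pos hcond, if_pos hcond]
      have hc : 15 * c < listT.length := by
        have := (Bool.and_eq_true _ _).mp hcond |>.1; simpa using this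
      have h15 : c * 15 + 15 ≤ listT.length := by omega
      by_cases hall : (PySem.List.slice listT (some ((15 * c : Nat) : Int)) (some ((15 * c + 15 : Nat) : Int))
          == List.replicate 15 (1 : Int)) = true
      · have hones : pvAllOnes (PySem.List.slice listT (some ((15 * c : Nat) : Int)) (some ((15 * c + 15 : Nat) : Int))) = true := by
          rw [← pvAllOnes_iff_replicate _ (by rw [PySem.List.slice_natCast]; simp only [List.length_take, List.length_drop]; omega)]
          exact hall
        have hcek : pvCekA listT c = 15 := (pvCek_eq_iff listT c h15).mpr hones
        rw [if_neg (by simp [hcek]), if_pos hall]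
        exact ih (c+1)
      · have hones : ¬ (pvAllOnes (PySem.List.slice listT (some ((15 * c : Nat) : Int)) (some ((15 * c + 15 : Nat) : Int))) = true) := by
          rw [← pvAllOnes_iff_replicate _ (by rw [PySem.List.slice_natCast]; simp only [List.length_take, List.length_drop]; omega)]
          exact hall
        have hcek : pvCekA listT c ≠ 15 := fun h => hones ((pvCek_eq_iff listT c h15).mp h)
        rw [if_pos (by simpa using hcek), if_neg hall]
        rw [pvMatches_eq listT point c h15 hp]
        by_cases hst : (pvStatusA listT point c 0 3 && (pvStatusA listT point c 3 7 &&
            (pvStatusA listT point c 7 11 && pvStatusA listT point c 11 14))) = true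
        · rw [if_pos hst, hst]; simp
        · rw [if_neg hst, Bool.eq_false_iff.mpr hst, Bool.false_or]
          exact ih (c+1)
    · rw [if_neg hcond, if_neg hcond]

theorem pvOuter_map (listT : List Int) (data_uji : List (List Int)) :
    jawabDataUji listT data_uji
      = data_uji.map (fun point => if pvWhileA listT point (listT.length + 1) 0 then (1 : Int) else 0) := by
  unfold jawabDataUji
  rw [show ((data_uji.length : Int)) = ((data_uji.length : Nat) : Int) from rfl]
  rw [PySem.List.foldl_pyRange_zero_pyGetD' data_uji []
    (fun terbang p => terbang ++ [if pvWhileA listT p (listT.length + 1) 0 then (1 : Int) else 0]) []]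
  rw [PySem.List.foldl_append_singleton_eq_map]
  simp

-- ===== VERDICT (by name: the statement is the Claim_ definition above) =====
theorem jawabDataUji_spec : Claim_equal_jawabDataUji := by
  intro listT data_uji _hdom hpre
  unfold Spec_jawabDataUji
  rw [pvOuter_map]
  by_cases hd : data_uji = []
  · subst hd; simp [jawabDataUji_alt]
  · rw [pvAlt_map listT data_uji hd]
    rcases hpre with h | h | h | h
    · exact absurd h hd
    · -- listT = []: both gates fail immediately
      subst h
      apply List.map_congr_left
      intro p _
      rw [show ([] : List Int).length + 1 = 1 from rfl]
      rw [pvWhileA, pvAnyRule]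
      rw [if_neg (by simp), if_neg (by simp)]
    · -- the very first gate test listT[14]==1 fails: no iteration on either side
      obtain ⟨hlen, hne⟩ := h
      have h14 : listT[14]? = some listT[14] := List.getElem?_eq_getElem (by omega)
      have hne' : ¬ (listT[14] = 1) := fun hx => hne (by rw [h14, hx])
      apply List.map_congr_left
      intro p _
      have hg : ¬ (PySem.List.pyGetD listT (14 : Int) 0 = 1) := by
        rw [PySem.List.pyGetD_eq_getElem listT 0 (by omega) (by exact_mod_cast (by omega : (14 : Int) < (listT.length : Int)))]
        simpa using hne'
      have hA : pvWhileA listT p (listT.length + 1) 0 = false := by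
        rw [pvWhileA]
        rw [if_neg (by intro hx; simp only [Bool.and_eq_true, beq_iff_eq] at hx; exact hg (by simpa using hx.2))]
      have hB : pvAnyRule listT p (listT.length + 1) 0 = false := by
        rw [pvAnyRule]
        rw [if_neg (by intro hx; simp only [Bool.and_eq_true, beq_iff_eq] at hx; exact hg (by simpa using hx.2))]
      rw [hA, hB]
    · apply List.map_congr_left
      intro p hpm
      rw [pvLoop_eq listT p h.1 (h.2 p hpm) (listT.length + 1) 0]
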